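-- pv_equiv track=rewrite | github.com/Jethro-Tsoi/Robo-Advisory-System-for-Personalized-Investment | src/data_processor.py | format_ner_output
-- ===== SOURCE A (Python) =====
-- from typing import List, Tuple, Optional, Dict, Any
--
-- def format_ner_output(tokens: List[str], labels: List[str]) -> str:
--     """Format NER results in a readable way"""
--     result = []
--     current_entity = None
--     current_text = []
--
--     for token, label in zip(tokens, labels):
--         if token in ["[CLS]", "[SEP]", "[PAD]"]:
--             continue
--
--         if label == "O":
--             if current_entity:
--                 result.append(f"{' '.join(current_text)} ({current_entity})")
--                 current_entity = None
--                 current_text = []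
--             result.append(token)
--         else:
--             entity_type = label[2:]  # Remove B- or I- prefix
--             if label.startswith("B-"):
--                 if current_entity:
--                     result.append(f"{' '.join(current_text)} ({current_entity})")
--                 current_entity = entity_type
--                 current_text = [token.replace("##", "")]
--             elif label.startswith("I-"):
--                 current_text.append(token.replace("##", ""))
--
--     if current_entity:
--         result.append(f"{' '.join(current_text)} ({current_entity})")
--
--     return " ".join(result)
-- ===== SOURCE B (Python) =====
-- def format_ner_output(tokens, labels):
--     """Span-based: filter special tokens first, then repeatedly consume an
--     entire entity run in one inner scan (no persistent open-group state)."""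
--     pairs = [(t, l) for t, l in zip(tokens, labels)
--              if t not in ("[CLS]", "[SEP]", "[PAD]")]
--     out = []
--     i, n = 0, len(pairs)
--     while i < n:
--         token, label = pairs[i]
--         i += 1
--         if label == "O":
--             out.append(token)
--         elif label.startswith("B-"):
--             entity_type = label[2:]
--             texts = [token.replace("##", "")]
--             while i < n and pairs[i][1] != "O" and not pairs[i][1].startswith("B-"):
--                 if pairs[i][1].startswith("I-"):
--                     texts.append(pairs[i][0].replace("##", ""))
--                 i += 1
--             if entity_type:
--                 out.append(f"{' '.join(texts)} ({entity_type})")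
--         # other labels (orphan I-, junk) contribute nothing
--     return " ".join(out)
-- ===== Notes on version B (the rewrite author's own statement) =====
-- stated objective: alternative
-- what changed: Replaces A's single stateful pass (open-entity accumulator flushed on O/B-/end) by filter-then-span: special tokens are filtered out up front, and each 'B-' triggers an inner scan that consumes the whole entity run at once and emits it immediately, so no open-group state is carried between top-level iterations.
import Mathlib
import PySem

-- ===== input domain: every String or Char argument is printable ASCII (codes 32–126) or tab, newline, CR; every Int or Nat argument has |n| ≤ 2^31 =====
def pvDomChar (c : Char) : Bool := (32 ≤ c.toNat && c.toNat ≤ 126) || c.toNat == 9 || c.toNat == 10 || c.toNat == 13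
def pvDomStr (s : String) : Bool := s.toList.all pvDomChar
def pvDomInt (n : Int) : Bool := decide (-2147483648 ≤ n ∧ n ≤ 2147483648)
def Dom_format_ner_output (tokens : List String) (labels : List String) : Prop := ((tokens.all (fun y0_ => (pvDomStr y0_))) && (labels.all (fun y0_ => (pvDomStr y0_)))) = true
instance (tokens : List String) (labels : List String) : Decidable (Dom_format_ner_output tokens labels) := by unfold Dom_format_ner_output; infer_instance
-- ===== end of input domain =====

-- B formats the same output by filter-then-span (consume each entity run in an inner scan) instead of A's single stateful pass; same values, different algorithmic decomposition.

-- ===== PORT A =====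
-- Python truthiness of `current_entity` (None or a string)
def pyTruthyOptStr (o : Option String) : Bool :=
  match o with
  | none => false
  | some s => !(s == "")

-- the interleaved loop of A: state = (result, current_entity, current_text)
def fmtA_go : List (String × String) → List String → Option String → List String → List String
  | [], result, centity, ctext =>
    if pyTruthyOptStr centity then
      result ++ [PySem.Str.join " " ctext ++ " (" ++ centity.getD "" ++ ")"]
    else result
  | (token, label) :: rest, result, centity, ctext =>
    if token == "[CLS]" || token == "[SEP]" || token == "[PAD]" then
      fmtA_go rest result centity ctext
    else if label == "O" then
      if pyTruthyOptStr centity then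
        fmtA_go rest (result ++ [PySem.Str.join " " ctext ++ " (" ++ centity.getD "" ++ ")"] ++ [token]) none []
      else
        fmtA_go rest (result ++ [token]) centity ctext
    else
      let entity_type := PySem.Str.slice label (some 2) none
      if PySem.Str.startswith label "B-" then
        if pyTruthyOptStr centity then
          fmtA_go rest (result ++ [PySem.Str.join " " ctext ++ " (" ++ centity.getD "" ++ ")"])
            (some entity_type) [PySem.Str.replace token "##" ""]
        else
          fmtA_go rest result (some entity_type) [PySem.Str.replace token "##" ""]
      else if PySem.Str.startswith label "I-" then
        fmtA_go rest result centity (ctext ++ [PySem.Str.replace token "##" ""])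
      else
        fmtA_go rest result centity ctext

def format_ner_output (tokens : List String) (labels : List String) : String :=
  PySem.Str.join " " (fmtA_go (tokens.zip labels) [] none [])

-- ===== PORT B =====
-- the special tokens filtered out up front
def nerSpecial (t : String) : Bool := t == "[CLS]" || t == "[SEP]" || t == "[PAD]"

-- the inner while-loop's continuation condition: stay inside the current entity run
def pGrp (q : String × String) : Bool := !(q.2 == "O") && !(PySem.Str.startswith q.2 "B-")

-- the cleaned texts the inner while-loop collects from a run
def iTexts (run : List (String × String)) : List String :=
  (run.filter (fun q => PySem.Str.startswith q.2 "I-")).map (fun q => PySem.Str.replace q.1 "##" "")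

-- the top-level while-loop of B: each 'B-' consumes its whole run (takeWhile/dropWhile = the inner while)
def fmtB : List (String × String) → List String
  | [] => []
  | (t, lab) :: rest =>
    if lab == "O" then t :: fmtB rest
    else if PySem.Str.startswith lab "B-" then
      let etype := PySem.Str.slice lab (some 2) none
      let texts := PySem.Str.replace t "##" "" :: iTexts (rest.takeWhile pGrp)
      (if etype == "" then [] else [PySem.Str.join " " texts ++ " (" ++ etype ++ ")"]) ++
        fmtB (rest.dropWhile pGrp)
    else fmtB rest
termination_by l => l.length
decreasing_by
  · simp
  · have := List.length_dropWhile_le (p := pGrp) (l := rest); simp; omega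
  · simp

def format_ner_output_alt (tokens : List String) (labels : List String) : String :=
  PySem.Str.join " " (fmtB (((tokens.zip labels).filter (fun q => !nerSpecial q.1))))

-- ===== PRECONDITION & SPEC =====
def Spec_format_ner_output (tokens : List String) (labels : List String) (out : String) : Prop := out = format_ner_output_alt tokens labels
instance (tokens : List String) (labels : List String) (out : String) : Decidable (Spec_format_ner_output tokens labels out) := by unfold Spec_format_ner_output; infer_instance

-- ===== CLAIM (what is proved, stated in full; the proofs are below) =====
def Claim_equal_format_ner_output : Prop := ∀ (tokens : List String) (labels : List String), Dom_format_ner_output tokens labels → Spec_format_ner_output tokens labels (format_ner_output tokens labels)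

-- ===== LEMMAS AND PROOFS =====

-- A skips special tokens inline; this moves the filtering out front
lemma fmtA_filter (l : List (String × String)) :
    ∀ result centity ctext,
      fmtA_go l result centity ctext = fmtA_go (l.filter (fun q => !nerSpecial q.1)) result centity ctext := by
  induction l with
  | nil => intro r c t; rfl
  | cons p rest ih =>
    intro r c t
    obtain ⟨tok, lab⟩ := p
    by_cases hs : nerSpecial tok = true
    · have hsp : (tok == "[CLS]" || tok == "[SEP]" || tok == "[PAD]") = true := hs
      rw [List.filter_cons_of_neg (by simp [hs])]
      simp only [fmtA_go, hsp, if_true]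
      exact ih r c t
    · have hsf : nerSpecial tok = false := by simpa using hs
      have hsp : (tok == "[CLS]" || tok == "[SEP]" || tok == "[PAD]") = false := by
        simpa [nerSpecial] using hsf
      rw [List.filter_cons_of_pos (by simp [hsf])]
      simp only [fmtA_go, hsp, Bool.false_eq_true, if_false]
      split_ifs <;> apply ih

-- fmtB skips any element inside a run (label neither "O" nor "B-…") at top level too
lemma fmtB_skip (q : String × String) (xs : List (String × String)) (h : pGrp q = true) :
    fmtB (q :: xs) = fmtB xs := by
  obtain ⟨t, lab⟩ := q
  have h1 : ¬ lab = "O" := by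
    intro he; subst he; simp [pGrp] at h
  have h2 : PySem.Chars.startswith lab.toList ['B', '-'] = false := by
    cases hB : PySem.Chars.startswith lab.toList ['B', '-'] with
    | false => rfl
    | true => simp [pGrp, PySem.Str.startswith_eq, hB] at h
  simp [fmtB, h1, h2]

lemma fmtB_dropWhile (l : List (String × String)) :
    fmtB (l.dropWhile pGrp) = fmtB l := by
  induction l with
  | nil => rfl
  | cons q xs ih =>
    by_cases h : pGrp q = true
    · rw [List.dropWhile_cons_of_pos h, ih, fmtB_skip q xs h]
    · rw [List.dropWhile_cons_of_neg (by simpa using h)]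

-- the core correspondence: A's stateful loop vs B's span recursion, on a special-free list
lemma fmtA_eq_fmtB (l : List (String × String)) (hns : ∀ q ∈ l, nerSpecial q.1 = false) :
    (∀ result centity ctext, pyTruthyOptStr centity = false →
      fmtA_go l result centity ctext = result ++ fmtB l)
    ∧ (∀ result e ts, (e == "") = false →
      fmtA_go l result (some e) ts =
        result ++ [PySem.Str.join " " (ts ++ iTexts (l.takeWhile pGrp)) ++ " (" ++ e ++ ")"]
          ++ fmtB (l.dropWhile pGrp)) := by
  induction l with
  | nil =>
    refine ⟨?_, ?_⟩
    · intro r c t hc; simp [fmtA_go, fmtB, hc]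
    · intro r e ts he
      simp [fmtA_go, fmtB, pyTruthyOptStr, he, iTexts]
  | cons p rest ih =>
    obtain ⟨tok, lab⟩ := p
    have hs : nerSpecial tok = false := hns (tok, lab) (List.mem_cons_self ..)
    have hs' : (tok == "[CLS]" || tok == "[SEP]" || tok == "[PAD]") = false := by
      simpa [nerSpecial] using hs
    have ih' := ih (fun q hq => hns q (by simp [hq]))
    by_cases hO : lab = "O"
    · subst hO
      have hpg : pGrp (tok, "O") = false := by simp [pGrp]
      refine ⟨?_, ?_⟩
      · intro r c t hc
        simp [fmtA_go, hs', hc, ih'.1, fmtB]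
      · intro r e ts he
        have hct : pyTruthyOptStr (some e) = true := by simp [pyTruthyOptStr, he]
        rw [List.takeWhile_cons_of_neg (p := pGrp) (l := rest) (by simp [hpg]),
          List.dropWhile_cons_of_neg (p := pGrp) (l := rest) (by simp [hpg])]
        simp [fmtA_go, hs', (show pyTruthyOptStr none = false from rfl), hct, ih'.1, fmtB, iTexts]
    · by_cases hB : PySem.Chars.startswith lab.toList ['B', '-'] = true
      · have hpg : pGrp (tok, lab) = false := by simp [pGrp, PySem.Str.startswith_eq, hB]
        by_cases he' : PySem.Str.slice lab (some 2) none = ""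
        · -- new group with falsy entity type: nothing is ever emitted from it
          refine ⟨?_, ?_⟩
          · intro r c t hc
            simp [fmtA_go, hs', (show pyTruthyOptStr (some "") = false from rfl), hO, PySem.Str.startswith_eq, hB, hc, ih'.1,
              fmtB, he', fmtB_dropWhile]
          · intro r e ts he
            have hct : pyTruthyOptStr (some e) = true := by simp [pyTruthyOptStr, he]
            rw [List.takeWhile_cons_of_neg (p := pGrp) (l := rest) (by simp [hpg]),
              List.dropWhile_cons_of_neg (p := pGrp) (l := rest) (by simp [hpg])]
            simp [fmtA_go, hs', (show pyTruthyOptStr (some "") = false from rfl), hO, PySem.Str.startswith_eq, hB, hct, ih'.1,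
              fmtB, he', fmtB_dropWhile, iTexts]
        · -- new group with truthy entity type
          refine ⟨?_, ?_⟩
          · intro r c t hc
            simp [fmtA_go, hs', hO, PySem.Str.startswith_eq, hB, hc, ih'.2, he',
              fmtB, iTexts]
          · intro r e ts he
            have hct : pyTruthyOptStr (some e) = true := by simp [pyTruthyOptStr, he]
            rw [List.takeWhile_cons_of_neg (p := pGrp) (l := rest) (by simp [hpg]),
              List.dropWhile_cons_of_neg (p := pGrp) (l := rest) (by simp [hpg])]
            simp [fmtA_go, hs', hO, PySem.Str.startswith_eq, hB, hct, ih'.2, he',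
              fmtB, iTexts]
      · have hpg : pGrp (tok, lab) = true := by
          simp [pGrp, PySem.Str.startswith_eq, hB, hO]
        have hskip := fmtB_skip (tok, lab) rest hpg
        by_cases hI : PySem.Chars.startswith lab.toList ['I', '-'] = true
        · refine ⟨?_, ?_⟩
          · intro r c t hc
            simp [fmtA_go, hs', hO, PySem.Str.startswith_eq, hB, hI, hc, ih'.1, hskip]
          · intro r e ts he
            rw [List.takeWhile_cons_of_pos hpg, List.dropWhile_cons_of_pos hpg]
            simp [fmtA_go, hs', hO, PySem.Str.startswith_eq, hB, hI, he, ih'.2, iTexts]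
        · refine ⟨?_, ?_⟩
          · intro r c t hc
            simp [fmtA_go, hs', hO, PySem.Str.startswith_eq, hB, hI, hc, ih'.1, hskip]
          · intro r e ts he
            rw [List.takeWhile_cons_of_pos hpg, List.dropWhile_cons_of_pos hpg]
            simp [fmtA_go, hs', hO, PySem.Str.startswith_eq, hB, hI, he, ih'.2, iTexts]

-- ===== VERDICT (by name: the statement is the Claim_ definition above) =====
theorem format_ner_output_spec : Claim_equal_format_ner_output := by
  intro tokens labels _
  unfold Spec_format_ner_output format_ner_output format_ner_output_alt
  rw [fmtA_filter]
  rw [(fmtA_eq_fmtB ((tokens.zip labels).filter (fun q => !nerSpecial q.1))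
        (fun q hq => by simpa using (List.of_mem_filter hq))).1 [] none [] rfl]
  simp
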